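-- pv_equiv track=rewrite | github.com/adamzeki/Skryptowe2 | count_paragraphs.py | count_paragraphs
-- ===== SOURCE A (Python) =====
-- def count_paragraphs(stream):
--     paragraph_count = 0
--     in_paragraph = False
--
--     for line in stream:
--         clean_line = line.strip()
--
--         if clean_line:
--             if not in_paragraph:
--                 paragraph_count += 1
--                 in_paragraph = True
--         else:
--             in_paragraph = False
--
--     return paragraph_count
-- ===== SOURCE B (Python) =====
-- def count_paragraphs(stream):
--     markers = ''.join('x' if line.strip() else ' ' for line in stream)
--     return len(markers.split())
-- ===== Notes on version B (the rewrite author's own statement) =====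
-- stated objective: idiomatic
-- what changed: Instead of a stateful transition-counting loop, B reduces each line to a one-character marker ('x' for non-blank, ' ' for blank), concatenates the markers into a string, and delegates the run counting to str.split(), whose whitespace-splitting semantics yields exactly one word per maximal non-blank run.
import Mathlib
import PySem

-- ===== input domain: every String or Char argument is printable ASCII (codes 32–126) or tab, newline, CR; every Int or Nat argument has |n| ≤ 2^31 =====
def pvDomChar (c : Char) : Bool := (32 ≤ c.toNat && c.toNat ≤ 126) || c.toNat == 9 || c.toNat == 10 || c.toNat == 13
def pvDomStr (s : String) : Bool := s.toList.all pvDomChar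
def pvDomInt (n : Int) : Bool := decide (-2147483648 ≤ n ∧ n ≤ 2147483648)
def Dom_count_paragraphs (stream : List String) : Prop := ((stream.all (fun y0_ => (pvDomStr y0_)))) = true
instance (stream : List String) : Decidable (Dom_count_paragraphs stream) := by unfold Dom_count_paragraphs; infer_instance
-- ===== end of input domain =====

-- B replaces A's stateful transition-counting loop by mapping each line to a one-character
-- marker ('x' non-blank / ' ' blank), joining them into a string and counting the words of
-- str.split(); objective: idiomatic.

-- ===== PORT A =====
-- loop body of A: updates the (paragraph_count, in_paragraph) state for one line
def pvStepA (st : Int × Bool) (line : String) : Int × Bool :=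
  let clean_line := PySem.Str.strip line
  if clean_line ≠ "" then
    if !st.2 then (st.1 + 1, true) else st
  else (st.1, false)

def count_paragraphs (stream : List String) : Int :=
  (stream.foldl pvStepA ((0 : Int), false)).1

-- ===== PORT B =====
def count_paragraphs_alt (stream : List String) : Int :=
  let markers := PySem.Str.join ""
    (stream.map (fun line => if PySem.Str.strip line ≠ "" then "x" else " "))
  ((PySem.Str.split₀ markers).length : Int)

-- ===== PRECONDITION & SPEC =====
def Spec_count_paragraphs (stream : List String) (out : Int) : Prop := out = count_paragraphs_alt stream
instance (stream : List String) (out : Int) : Decidable (Spec_count_paragraphs stream out) := by unfold Spec_count_paragraphs; infer_instance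

-- ===== CLAIM (what is proved, stated in full; the proofs are below) =====
def Claim_equal_count_paragraphs : Prop := ∀ (stream : List String), Dom_count_paragraphs stream → Spec_count_paragraphs stream (count_paragraphs stream)

-- ===== LEMMAS AND PROOFS =====

-- shifting the running count out of A's fold
theorem pv_fold_shift (t : List String) : ∀ (c : Int) (b : Bool),
    (t.foldl pvStepA (c, b)).1 = c + (t.foldl pvStepA (0, b)).1 := by
  induction t with
  | nil => intro c b; simp
  | cons s t ih =>
    intro c b
    rw [List.foldl_cons, List.foldl_cons]
    by_cases h : PySem.Str.strip s = ""
    · have e1 : pvStepA (c, b) s = (c, false) := by simp [pvStepA, h]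
      have e2 : pvStepA ((0 : Int), b) s = (0, false) := by simp [pvStepA, h]
      rw [e1, e2, ih]
    · cases b with
      | false =>
        have e1 : pvStepA (c, false) s = (c + 1, true) := by simp [pvStepA, h]
        have e2 : pvStepA ((0 : Int), false) s = (1, true) := by simp [pvStepA, h]
        rw [e1, e2, ih (c + 1) true, ih 1 true]; ring
      | true =>
        have e1 : pvStepA (c, true) s = (c, true) := by simp [pvStepA, h]
        have e2 : pvStepA ((0 : Int), true) s = (0, true) := by simp [pvStepA, h]
        rw [e1, e2, ih c true]

-- marker character of one line
def pvMarker (line : String) : Char :=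
  if PySem.Str.strip line ≠ "" then 'x' else ' '

-- the split₀ word-scanner on the marker characters computes A's fold:
-- acc holds the finished words, cur the (reversed) current word; cur nonempty ↔ in_paragraph
theorem pv_go_main (t : List String) : ∀ (cur : List Char) (acc : List (List Char)),
    ((PySem.Chars.split₀.go (t.map pvMarker) cur acc).length : Int)
      = acc.length + (if cur.isEmpty then 0 else 1) + (t.foldl pvStepA (0, !cur.isEmpty)).1 := by
  induction t with
  | nil =>
    intro cur acc
    cases cur <;> simp [PySem.Chars.split₀.go]
  | cons s t ih =>
    intro cur acc
    rw [List.map_cons]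
    by_cases h : PySem.Str.strip s = ""
    · have hm : pvMarker s = ' ' := by simp [pvMarker, h]
      rw [hm]
      have hsp : PySem.Chars.isspace ' ' = true := by decide
      cases cur with
      | nil =>
        rw [show PySem.Chars.split₀.go (' ' :: t.map pvMarker) [] acc
              = PySem.Chars.split₀.go (t.map pvMarker) [] acc by
            simp [PySem.Chars.split₀.go, hsp]]
        rw [ih [] acc, List.foldl_cons]
        have e : pvStepA ((0 : Int), false) s = (0, false) := by simp [pvStepA, h]
        rw [show (!(List.nil (α := Char)).isEmpty) = false from rfl, e]
      | cons c0 cs =>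
        rw [show PySem.Chars.split₀.go (' ' :: t.map pvMarker) (c0 :: cs) acc
              = PySem.Chars.split₀.go (t.map pvMarker) [] (((c0 :: cs).reverse) :: acc) by
            simp [PySem.Chars.split₀.go, hsp]]
        rw [ih [] (((c0 :: cs).reverse) :: acc), List.foldl_cons]
        have e : pvStepA ((0 : Int), true) s = (0, false) := by simp [pvStepA, h]
        rw [show (!(c0 :: cs).isEmpty) = true from rfl, e]
        simp
    · have hm : pvMarker s = 'x' := by simp [pvMarker, h]
      rw [hm]
      have hsp : PySem.Chars.isspace 'x' = false := by decide
      rw [show PySem.Chars.split₀.go ('x' :: t.map pvMarker) cur acc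
            = PySem.Chars.split₀.go (t.map pvMarker) ('x' :: cur) acc by
          simp [PySem.Chars.split₀.go, hsp]]
      rw [ih ('x' :: cur) acc, List.foldl_cons]
      cases cur with
      | nil =>
        have e : pvStepA ((0 : Int), false) s = (1, true) := by simp [pvStepA, h]
        rw [show (!(List.nil (α := Char)).isEmpty) = false from rfl, e,
            pv_fold_shift t 1 true]
        simp; ring
      | cons c0 cs =>
        have e : pvStepA ((0 : Int), true) s = (0, true) := by simp [pvStepA, h]
        rw [show (!(c0 :: cs).isEmpty) = true from rfl, e]
        simp

-- intercalating with the empty separator is flattening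
theorem pv_intersperse_nil_flatten (l : List (List Char)) :
    (List.intersperse ([] : List Char) l).flatten = l.flatten := by
  induction l with
  | nil => rfl
  | cons a t ih =>
    cases t with
    | nil => rfl
    | cons b u =>
      rw [show List.intersperse ([] : List Char) (a :: b :: u)
            = a :: [] :: List.intersperse [] (b :: u) by simp [List.intersperse]]
      simp_all

-- the joined marker string's character list is the list of marker characters
theorem pv_markers_toList (stream : List String) :
    (PySem.Str.join ""
      (stream.map (fun line => if PySem.Str.strip line ≠ "" then "x" else " "))).toList
      = stream.map pvMarker := by
  rw [PySem.Str.toList_join]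
  simp only [PySem.Chars.join, List.intercalate]
  rw [show ("" : String).toList = [] from rfl, pv_intersperse_nil_flatten]
  induction stream with
  | nil => rfl
  | cons s t ih =>
    by_cases h : PySem.Str.strip s = ""
    · simpa [pvMarker, h] using ih
    · simpa [pvMarker, h] using ih

-- ===== VERDICT (by name: the statement is the Claim_ definition above) =====
theorem count_paragraphs_spec : Claim_equal_count_paragraphs := by
  intro stream _
  unfold Spec_count_paragraphs count_paragraphs count_paragraphs_alt
  simp only [PySem.Str.split₀]
  simp only [List.length_map, pv_markers_toList]
  simp only [PySem.Chars.split₀]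
  rw [pv_go_main stream [] []]
  simp
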